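-- pv_equiv track=rewrite | github.com/ankul-in/Two-years | KATA120.py | shared_bits
-- ===== SOURCE A (Python) =====
-- def shared_bits(a, b):
--     bin_a = bin(a)[2:]
--     bin_b = bin(b)[2:]
--     max_len = max(len(bin_a), len(bin_b))
--     bin_a = bin_a.zfill(max_len)
--     bin_b = bin_b.zfill(max_len)
--     zipped = list(zip(bin_a, bin_b))
--     count=0
--     for i,j in zipped:
--
--             if i==j=="1":
--                 count+=1
--     return count>1
-- ===== SOURCE B (Python) =====
-- def shared_bits(a, b):
--     return (abs(a) & abs(b)).bit_count() > 1
-- ===== Notes on version B (the rewrite author's own statement) =====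
-- stated objective: simpler
-- what changed: Replaces the binary-string build (bin, slicing off the prefix, zfill alignment, zip, and a counting loop over character pairs) with a single integer expression: the bitwise AND of the magnitudes followed by a popcount; abs() matches A's sign-stripping of the bin string.
import Mathlib
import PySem

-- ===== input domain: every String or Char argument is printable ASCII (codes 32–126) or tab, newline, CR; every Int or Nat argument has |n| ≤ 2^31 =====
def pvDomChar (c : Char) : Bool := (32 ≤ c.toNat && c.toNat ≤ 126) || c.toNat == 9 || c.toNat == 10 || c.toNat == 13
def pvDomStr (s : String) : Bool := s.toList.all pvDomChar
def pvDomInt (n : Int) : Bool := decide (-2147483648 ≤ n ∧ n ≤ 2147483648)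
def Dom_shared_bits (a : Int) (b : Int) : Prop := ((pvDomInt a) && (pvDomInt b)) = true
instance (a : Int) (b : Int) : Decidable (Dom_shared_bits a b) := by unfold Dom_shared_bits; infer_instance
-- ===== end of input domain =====

-- B replaces A's binary-string build (bin/zfill/zip and a character-pair counting loop) by one
-- integer expression — popcount of the AND of the magnitudes — for simplicity; same results.

-- ===== PORT A =====
-- Python bin(n) digit part: digits of |n|, MSB first (fuel n+1 suffices since n/2 < n for n > 0)
def binDigitsAux : Nat → Nat → List Char
  | 0, _ => []
  | f+1, n => if n = 0 then [] else binDigitsAux f (n / 2) ++ [if n % 2 = 1 then '1' else '0']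

-- bin(a) as a character list: optional '-', then "0b", then the digits of |a| ('0' for 0); exact
def pyBin (a : Int) : List Char :=
  (if a < 0 then ['-'] else []) ++ ['0', 'b'] ++
    (if a.natAbs = 0 then ['0'] else binDigitsAux (a.natAbs + 1) a.natAbs)

-- s.zfill(m): left-pad with '0'; exact here since A's strings never start with a sign character
def zfillChars (s : List Char) (m : Nat) : List Char := List.replicate (m - s.length) '0' ++ s

def shared_bits (a : Int) (b : Int) : Bool :=
  let bin_a := (pyBin a).drop 2          -- bin(a)[2:] (bin(...) has length ≥ 3, so [2:] = drop 2)
  let bin_b := (pyBin b).drop 2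
  let max_len := max bin_a.length bin_b.length
  let bin_a := zfillChars bin_a max_len
  let bin_b := zfillChars bin_b max_len
  let zipped := List.zip bin_a bin_b
  let count : Int := zipped.foldl (fun c p => if p.1 = p.2 ∧ p.2 = '1' then c + 1 else c) 0
  decide (count > 1)

-- ===== PORT B =====
def shared_bits_alt (a : Int) (b : Int) : Bool :=
  -- (abs(a) & abs(b)).bit_count() > 1 ; abs of an int is its natAbs, & of nonnegatives is Nat.land
  decide (PySem.Int.bitCount ((a.natAbs &&& b.natAbs : Nat) : Int) > 1)

-- ===== PRECONDITION & SPEC =====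
def Spec_shared_bits (a : Int) (b : Int) (out : Bool) : Prop := out = shared_bits_alt a b
instance (a : Int) (b : Int) (out : Bool) : Decidable (Spec_shared_bits a b out) := by unfold Spec_shared_bits; infer_instance

-- ===== CLAIM (what is proved, stated in full; the proofs are below) =====
def Claim_equal_shared_bits : Prop := ∀ (a : Int) (b : Int), Dom_shared_bits a b → Spec_shared_bits a b (shared_bits a b)

-- ===== LEMMAS AND PROOFS =====

-- number of bit positions at which both numbers are set (both ports compute this)
def andCount (m n : Nat) : Nat :=
  if h : m = 0 ∨ n = 0 then 0
  else (if m % 2 = 1 ∧ n % 2 = 1 then 1 else 0) + andCount (m / 2) (n / 2)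
termination_by m
decreasing_by exact Nat.div_lt_self (Nat.pos_of_ne_zero (fun hm => h (Or.inl hm))) one_lt_two

def popcount (k : Nat) : Nat :=
  if h : k = 0 then 0 else k % 2 + popcount (k / 2)
termination_by k
decreasing_by exact Nat.div_lt_self (Nat.pos_of_ne_zero h) one_lt_two

-- binary digits of m as characters, LSB first
def lsbChars (m : Nat) : List Char :=
  if h : m = 0 then [] else (if m % 2 = 1 then '1' else '0') :: lsbChars (m / 2)
termination_by m
decreasing_by exact Nat.div_lt_self (Nat.pos_of_ne_zero h) one_lt_two

-- A's loop condition as a countP predicate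
def pB : Char × Char → Bool := fun p => decide (p.1 = p.2 ∧ p.2 = '1')

theorem lsbChars_zero : lsbChars 0 = [] := by rw [lsbChars]; simp

theorem lsbChars_pos (m : Nat) (h : m ≠ 0) :
    lsbChars m = (if m % 2 = 1 then '1' else '0') :: lsbChars (m / 2) := by
  rw [lsbChars]; simp [h]

theorem bitCountAux_eq_popcount : ∀ (f k : Nat), k < f → PySem.Int.bitCountAux f k = popcount k := by
  intro f
  induction f with
  | zero => intro k hk; omega
  | succ f ih =>
    intro k hk
    rw [popcount]
    by_cases h0 : k = 0
    · simp [PySem.Int.bitCountAux, h0]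
    · have : k / 2 < f := by
        have := Nat.div_lt_self (Nat.pos_of_ne_zero h0) one_lt_two; omega
      simp [PySem.Int.bitCountAux, h0, ih _ this]

theorem land_mod_two (m n : Nat) : (m &&& n) % 2 = if m % 2 = 1 ∧ n % 2 = 1 then 1 else 0 := by
  have h := Nat.testBit_and m n 0
  simp only [Nat.testBit_zero] at h
  rw [← Bool.decide_and, decide_eq_decide] at h
  split_ifs with hc
  · omega
  · have : ¬ ((m &&& n) % 2 = 1) := by rw [h]; exact hc
    omega

theorem popcount_zero : popcount 0 = 0 := by rw [popcount]; simp

theorem popcount_land (m n : Nat) : popcount (m &&& n) = andCount m n := by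
  induction m using Nat.strong_induction_on generalizing n with
  | _ m ih =>
    rw [andCount]
    by_cases h0 : m = 0 ∨ n = 0
    · have hz : m &&& n = 0 := by rcases h0 with h | h <;> simp [h]
      simp [h0, hz, popcount_zero]
    · have hm : m ≠ 0 := fun h => h0 (Or.inl h)
      have hlt : m / 2 < m := Nat.div_lt_self (Nat.pos_of_ne_zero hm) one_lt_two
      have hih := ih (m / 2) hlt (n / 2)
      simp only [h0, dite_false]
      by_cases hz : m &&& n = 0
      · have hbit : (if m % 2 = 1 ∧ n % 2 = 1 then 1 else 0) = 0 := by
          have h2 := land_mod_two m n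
          rw [hz] at h2
          omega
        have hz2 : (m / 2) &&& (n / 2) = 0 := by rw [← Nat.and_div_two, hz]
        rw [hz, popcount_zero, hbit, ← hih, hz2, popcount_zero]
      · rw [popcount]
        simp only [hz, dite_false]
        rw [land_mod_two, Nat.and_div_two, hih]

theorem binDigitsAux_reverse : ∀ (f m : Nat), m < f → (binDigitsAux f m).reverse = lsbChars m := by
  intro f
  induction f with
  | zero => intro m hm; omega
  | succ f ih =>
    intro m hm
    rw [lsbChars]
    by_cases h0 : m = 0
    · simp [binDigitsAux, h0]
    · have : m / 2 < f := by
        have := Nat.div_lt_self (Nat.pos_of_ne_zero h0) one_lt_two; omega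
      simp [binDigitsAux, h0, ih _ this]

theorem zip_reverse_eq {α β : Type} : ∀ (xs : List α) (ys : List β), xs.length = ys.length →
    (xs.zip ys).reverse = xs.reverse.zip ys.reverse := by
  intro xs
  induction xs with
  | nil => intro ys h; simp
  | cons x xs ih =>
    intro ys h
    cases ys with
    | nil => simp at h
    | cons y ys =>
      simp only [List.length_cons, Nat.add_right_cancel_iff] at h
      simp only [List.zip_cons_cons, List.reverse_cons, ih ys h]
      rw [List.zip_append (by simp [h])]
      simp

theorem countP_zip_left_junk : ∀ (js ys : List Char), (∀ c ∈ js, c ≠ '1') →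
    (js.zip ys).countP pB = 0 := by
  intro js
  induction js with
  | nil => intro ys h; simp
  | cons j js ih =>
    intro ys h
    cases ys with
    | nil => simp
    | cons y ys =>
      have hj : j ≠ '1' := h j (by simp)
      simp only [List.zip_cons_cons, List.countP_cons]
      rw [ih ys (fun c hc => h c (by simp [hc]))]
      simp [pB]
      intro h1 h2
      exact absurd (h1.trans h2) hj

theorem countP_zip_right_junk : ∀ (xs js : List Char), (∀ c ∈ js, c ≠ '1') →
    (xs.zip js).countP pB = 0 := by
  intro xs
  induction xs with
  | nil => intro js h; simp
  | cons x xs ih =>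
    intro js h
    cases js with
    | nil => simp
    | cons j js =>
      have hj : j ≠ '1' := h j (by simp)
      simp only [List.zip_cons_cons, List.countP_cons]
      rw [ih js (fun c hc => h c (by simp [hc]))]
      simp [pB]
      intro h1 h2
      exact absurd h2 hj

theorem countP_zip_lsb : ∀ (m n : Nat) (ja jb : List Char),
    (∀ c ∈ ja, c ≠ '1') → (∀ c ∈ jb, c ≠ '1') →
    ((lsbChars m ++ ja).zip (lsbChars n ++ jb)).countP pB = andCount m n := by
  intro m
  induction m using Nat.strong_induction_on with
  | _ m ih =>
    intro n ja jb hja hjb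
    rw [andCount]
    by_cases h0 : m = 0 ∨ n = 0
    · rw [dif_pos h0]
      rcases h0 with h | h
      · rw [h, lsbChars_zero, List.nil_append]
        exact countP_zip_left_junk _ _ hja
      · rw [h, lsbChars_zero, List.nil_append]
        exact countP_zip_right_junk _ _ hjb
    · rw [dif_neg h0]
      have hm : m ≠ 0 := fun h => h0 (Or.inl h)
      have hn : n ≠ 0 := fun h => h0 (Or.inr h)
      rw [lsbChars_pos m hm, lsbChars_pos n hn]
      simp only [List.cons_append, List.zip_cons_cons, List.countP_cons]
      rw [ih (m / 2) (Nat.div_lt_self (Nat.pos_of_ne_zero hm) one_lt_two) (n / 2) ja jb hja hjb]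
      rw [Nat.add_comm]
      congr 1
      by_cases h2 : m % 2 = 1 <;> by_cases h3 : n % 2 = 1 <;>
        simp [pB, h2, h3]

-- (pyBin a).drop 2 reversed is |a|'s LSB digits followed by junk containing no '1'
theorem pyBin_drop_reverse (a : Int) : ∃ j : List Char,
    ((pyBin a).drop 2).reverse = lsbChars a.natAbs ++ j ∧ ∀ c ∈ j, c ≠ '1' := by
  by_cases hm : a.natAbs = 0
  · have ha : ¬ a < 0 := by
      intro h; exact absurd (Int.natAbs_eq_zero.mp hm) (by omega)
    refine ⟨['0'], ?_, ?_⟩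
    · simp [pyBin, hm, ha, lsbChars_zero]
    · intro c hc; simp at hc; simp [hc]
  · have hrev := binDigitsAux_reverse (a.natAbs + 1) a.natAbs (Nat.lt_succ_self _)
    by_cases ha : a < 0
    · refine ⟨['b'], ?_, ?_⟩
      · simp [pyBin, hm, ha, hrev]
      · intro c hc; simp at hc; simp [hc]
    · refine ⟨[], ?_, ?_⟩
      · simp [pyBin, hm, ha, hrev]
      · intro c hc; simp at hc

theorem zfillChars_length (s : List Char) (L : Nat) (h : s.length ≤ L) :
    (zfillChars s L).length = L := by
  simp [zfillChars]; omega

theorem zfillChars_reverse (s : List Char) (L : Nat) :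
    (zfillChars s L).reverse = s.reverse ++ List.replicate (L - s.length) '0' := by
  simp [zfillChars]

theorem shared_bits_eq (a b : Int) :
    shared_bits a b = decide ((andCount a.natAbs b.natAbs : Int) > 1) := by
  obtain ⟨ja, hja, hjna⟩ := pyBin_drop_reverse a
  obtain ⟨jb, hjb, hjnb⟩ := pyBin_drop_reverse b
  simp only [shared_bits]
  rw [PySem.List.foldl_ite_add_one]
  have hkey : ∀ (sa sb : List Char) (L : Nat), sa.length ≤ L → sb.length ≤ L →
      sa.reverse = lsbChars a.natAbs ++ ja → sb.reverse = lsbChars b.natAbs ++ jb →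
      ((zfillChars sa L).zip (zfillChars sb L)).countP pB = andCount a.natAbs b.natAbs := by
    intro sa sb L hla hlb hsa hsb
    rw [← List.countP_reverse,
        zip_reverse_eq _ _ ((zfillChars_length sa L hla).trans (zfillChars_length sb L hlb).symm),
        zfillChars_reverse, zfillChars_reverse, hsa, hsb, List.append_assoc, List.append_assoc]
    refine countP_zip_lsb a.natAbs b.natAbs _ _ ?_ ?_
    · intro c hc
      rcases List.mem_append.mp hc with h | h
      · exact hjna c h
      · rw [List.eq_of_mem_replicate h]; decide
    · intro c hc
      rcases List.mem_append.mp hc with h | h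
      · exact hjnb c h
      · rw [List.eq_of_mem_replicate h]; decide
  rw [show (fun x : Char × Char => decide (x.1 = x.2 ∧ x.2 = '1')) = pB from rfl]
  rw [hkey ((pyBin a).drop 2) ((pyBin b).drop 2)
        (max ((pyBin a).drop 2).length ((pyBin b).drop 2).length)
        (Nat.le_max_left _ _) (Nat.le_max_right _ _) hja hjb]
  simp

theorem shared_bits_alt_eq (a b : Int) :
    shared_bits_alt a b = decide ((andCount a.natAbs b.natAbs : Int) > 1) := by
  simp only [shared_bits_alt, PySem.Int.bitCount, Int.natAbs_natCast]
  have h := bitCountAux_eq_popcount ((a.natAbs &&& b.natAbs) + 1) (a.natAbs &&& b.natAbs)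
    (Nat.lt_succ_self _)
  simp only [h, popcount_land, decide_eq_decide]
  exact_mod_cast Iff.rfl

-- ===== VERDICT (by name: the statement is the Claim_ definition above) =====
theorem shared_bits_spec : Claim_equal_shared_bits := by
  intro a b _
  show shared_bits a b = shared_bits_alt a b
  rw [shared_bits_eq, shared_bits_alt_eq]
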